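-- pv_equiv track=rewrite | github.com/xUDAYx/RDF-STUDIO | test_files/test2.py | create_table_data
-- ===== SOURCE A (Python) =====
-- def create_table_data(folder_contents):
--     columns = list(folder_contents.keys())
--     rows = []
--     max_files = max(len(files) for files in folder_contents.values())
--     for i in range(max_files):
--         row = [folder_contents[folder][i] if i < len(folder_contents[folder]) else "" for folder in columns]
--         rows.append(row)
--     table_data = [columns] + rows
--     return table_data
-- ===== SOURCE B (Python) =====
-- def create_table_data(folder_contents):
--     table = [list(folder_contents)]
--     cols = [list(v) for v in folder_contents.values()]
--     while any(cols):
--         table.append([c[0] if c else "" for c in cols])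
--         cols = [c[1:] if c else c for c in cols]
--     return table
-- ===== Notes on version B (the rewrite author's own statement) =====
-- stated objective: alternative
-- what changed: B transposes by repeatedly taking the heads of the value lists and stepping to their tails (no max_files, no per-cell index/bounds check, no dict re-lookup by key), instead of A's index loop over range(max_files) with folder_contents[folder][i] lookups. (On the empty dict, excluded by Pre_, A raises ValueError.)
import Mathlib
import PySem

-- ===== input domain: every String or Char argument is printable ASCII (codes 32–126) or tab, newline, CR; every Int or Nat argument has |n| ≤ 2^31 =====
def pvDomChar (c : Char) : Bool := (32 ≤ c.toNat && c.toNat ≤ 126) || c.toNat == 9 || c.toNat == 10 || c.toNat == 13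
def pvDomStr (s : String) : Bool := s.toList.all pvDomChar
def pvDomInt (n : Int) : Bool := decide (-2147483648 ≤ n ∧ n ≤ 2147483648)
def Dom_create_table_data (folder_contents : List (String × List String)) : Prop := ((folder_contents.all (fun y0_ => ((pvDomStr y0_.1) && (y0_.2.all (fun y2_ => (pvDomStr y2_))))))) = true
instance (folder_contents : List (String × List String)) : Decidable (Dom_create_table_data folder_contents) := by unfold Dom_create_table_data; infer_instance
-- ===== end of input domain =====

-- B replaces A's range(max_files)+indexing transpose by head/tail consumption of the value lists (objective: alternative decomposition).

-- ===== PORT A =====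
def create_table_data (folder_contents : List (String × List String)) : List (List String) :=
  let columns := folder_contents.map Prod.fst
  -- max(len(files) for files in folder_contents.values()): none = ValueError on an empty dict (excluded by Pre_)
  match PySem.List.max? (folder_contents.map (fun p => (p.2.length : Int))) (fun x => x) with
  | none => []
  | some maxFiles =>
    let rows := (PySem.List.pyRange 0 maxFiles 1).map (fun i =>
      columns.map (fun folder =>
        -- folder_contents[folder]: folder comes from keys, so the lookup always hits (getD [] is unreachable)
        let files := (folder_contents.lookup folder).getD []
        if i < (files.length : Int) then PySem.List.pyGetD files i "" else ""))
    [columns] ++ rows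

-- ===== PORT B =====
-- [c[0] if c else "" for c in cols]
def pvHeadsRow (cols : List (List String)) : List String :=
  cols.map (fun c => match c with | [] => "" | x :: _ => x)

-- [c[1:] if c else c for c in cols]
def pvTails (cols : List (List String)) : List (List String) :=
  cols.map (fun c => match c with | [] => [] | _ :: t => t)

theorem pvTails_sum_le (cols : List (List String)) :
    ((pvTails cols).map List.length).sum ≤ (cols.map List.length).sum := by
  induction cols with
  | nil => simp [pvTails]
  | cons c cs ih =>
    simp only [pvTails, List.map_cons, List.sum_cons] at ih ⊢
    have hd : (match c with | [] => ([] : List String) | _ :: t => t).length ≤ c.length := by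
      cases c <;> simp
    omega

theorem pvTails_sum_lt (cols : List (List String)) (h : cols.any (fun c => !c.isEmpty)) :
    ((pvTails cols).map List.length).sum < (cols.map List.length).sum := by
  induction cols with
  | nil => simp at h
  | cons c cs ih =>
    simp only [List.any_cons, Bool.or_eq_true] at h
    have hle := pvTails_sum_le cs
    simp only [pvTails, List.map_cons, List.sum_cons] at hle ⊢
    rcases h with h | h
    · have hd : (match c with | [] => ([] : List String) | _ :: t => t).length < c.length := by
        cases c with
        | nil => simp at h
        | cons x t => simp
      omega
    · have := ih h
      have hd : (match c with | [] => ([] : List String) | _ :: t => t).length ≤ c.length := by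
        cases c <;> simp
      simp only [pvTails] at this
      omega

-- while any(cols): append heads row; step to tails
def pvTranspose (cols : List (List String)) : List (List String) :=
  if hny : cols.any (fun c => !c.isEmpty) then
    pvHeadsRow cols :: pvTranspose (pvTails cols)
  else []
termination_by (cols.map List.length).sum
decreasing_by exact pvTails_sum_lt cols hny

def create_table_data_alt (folder_contents : List (String × List String)) : List (List String) :=
  (folder_contents.map Prod.fst) :: pvTranspose (folder_contents.map Prod.snd)

-- ===== PRECONDITION & SPEC =====
-- Pre_ excludes (a) the empty dict, on which Python A raises ValueError (max() of an empty sequence),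
-- and (b) association lists with duplicate keys, which cannot arise from a Python dict argument.
def Pre_create_table_data (folder_contents : List (String × List String)) : Prop :=
  folder_contents ≠ [] ∧ (folder_contents.map Prod.fst).Nodup

instance (folder_contents : List (String × List String)) : Decidable (Pre_create_table_data folder_contents) := by
  unfold Pre_create_table_data; infer_instance

def pvWitness_create_table_data : (List (String × List String)) :=
  [("a", ["x", "y"]), ("b", ["z"])]

def Spec_create_table_data (folder_contents : List (String × List String)) (out : List (List String)) : Prop :=
  out = create_table_data_alt folder_contents

instance (folder_contents : List (String × List String)) (out : List (List String)) : Decidable (Spec_create_table_data folder_contents out) := by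
  unfold Spec_create_table_data; infer_instance

-- ===== CLAIM (what is proved, stated in full; the proofs are below) =====
def Claim_equal_create_table_data : Prop := ∀ (folder_contents : List (String × List String)), Dom_create_table_data folder_contents → Pre_create_table_data folder_contents → Spec_create_table_data folder_contents (create_table_data folder_contents)

-- ===== LEMMAS AND PROOFS =====

-- the maximum length of the value lists (in Nat)
def pvMaxLen (vals : List (List String)) : Nat := (vals.map List.length).foldr max 0

theorem pvMaxLen_tails (vals : List (List String)) :
    pvMaxLen (pvTails vals) = pvMaxLen vals - 1 := by
  induction vals with
  | nil => simp [pvMaxLen, pvTails]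
  | cons c cs ih =>
    simp only [pvMaxLen, pvTails, List.map_cons, List.foldr_cons] at ih ⊢
    have hc : (match c with | [] => ([] : List String) | _ :: t => t).length = c.length - 1 := by
      cases c <;> simp
    rw [hc, ih]
    omega

theorem pvMaxLen_zero_all_nil (vals : List (List String)) (h : pvMaxLen vals = 0) :
    ∀ v ∈ vals, v = [] := by
  induction vals with
  | nil => intro v hv; simp at hv
  | cons c cs ih =>
    simp only [pvMaxLen, List.map_cons, List.foldr_cons] at h
    intro v hv
    rcases List.mem_cons.mp hv with hv | hv
    · subst hv; exact List.eq_nil_of_length_eq_zero (by omega)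
    · exact ih (by simp only [pvMaxLen]; omega) v hv

theorem pvMaxLen_eq_zero_of_all (vals : List (List String)) (h : ∀ v ∈ vals, v.isEmpty = true) :
    pvMaxLen vals = 0 := by
  induction vals with
  | nil => simp [pvMaxLen]
  | cons c cs ih =>
    have h1 : c = [] := List.isEmpty_iff.mp (h c (by simp))
    have h2 : pvMaxLen cs = 0 := ih (fun v hv => h v (by simp [hv]))
    simp only [pvMaxLen, List.map_cons, List.foldr_cons, h1, List.length_nil] at h2 ⊢
    omega

theorem pvMaxLen_pos_any (vals : List (List String)) (h : 0 < pvMaxLen vals) :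
    vals.any (fun c => !c.isEmpty) = true := by
  by_contra hc
  simp only [List.any_eq_true, not_exists, not_and, Bool.not_eq_true'] at hc
  have := pvMaxLen_eq_zero_of_all vals (fun v hv => by
    have := hc v hv
    simpa using this)
  omega

-- getD through the "c[1:] if c else c" step shifts the index by one
theorem pvGetD_tail_step (c : List String) (k : Nat) :
    (match c with | [] => ([] : List String) | _ :: t => t).getD k "" = c.getD (k + 1) "" := by
  cases c <;> simp

-- the core transpose characterisation: B's loop yields exactly A's indexed rows
theorem pvTranspose_eq (N : Nat) (vals : List (List String)) (h : pvMaxLen vals = N) :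
    pvTranspose vals = (List.range N).map (fun k => vals.map (fun v => v.getD k "")) := by
  induction N generalizing vals with
  | zero =>
    rw [pvTranspose]
    simp only [List.range_zero, List.map_nil]
    rw [dif_neg]
    intro hany
    simp only [List.any_eq_true, Bool.not_eq_true'] at hany
    obtain ⟨c, hcm, hne⟩ := hany
    have := pvMaxLen_zero_all_nil vals h c hcm
    subst this; simp at hne
  | succ n ih =>
    rw [pvTranspose]
    rw [dif_pos (pvMaxLen_pos_any vals (by omega))]
    have htail : pvMaxLen (pvTails vals) = n := by rw [pvMaxLen_tails, h]; omega
    rw [ih (pvTails vals) htail]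
    rw [List.range_succ_eq_map]
    simp only [List.map_cons, List.map_map]
    congr 1
    · simp only [pvHeadsRow]
      apply List.map_congr_left
      intro c _; cases c <;> simp
    · apply List.map_congr_left
      intro k _
      simp only [Function.comp, pvTails, List.map_map]
      apply List.map_congr_left
      intro c _
      simpa using pvGetD_tail_step c k

-- first-match lookup recovers the stored value when keys are distinct
theorem pvLookup_of_mem (fc : List (String × List String)) (k : String) (v : List String)
    (hnd : (fc.map Prod.fst).Nodup) (hm : (k, v) ∈ fc) : fc.lookup k = some v := by
  induction fc with
  | nil => simp at hm
  | cons p ps ih =>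
    simp only [List.map_cons, List.nodup_cons] at hnd
    rcases List.mem_cons.mp hm with hm | hm
    · simp [List.lookup, ← hm]
    · have hne : k ≠ p.1 := by
        have hmem : k ∈ ps.map Prod.fst := List.mem_map.mpr ⟨(k, v), hm, rfl⟩
        intro he; rw [he] at hmem; exact hnd.1 hmem
      have hb : (k == p.1) = false := beq_eq_false_iff_ne.mpr hne
      simp only [List.lookup, hb]
      exact ih hnd.2 hm

-- max? over the cast lengths computes pvMaxLen
theorem pvFoldl_max_cast (ps : List (String × List String)) (a : Nat) :
    (ps.map (fun p => (p.2.length : Int))).foldl max (a : Int)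
      = (((ps.map (fun p => p.2.length)).foldl max a : Nat) : Int) := by
  induction ps generalizing a with
  | nil => simp
  | cons p t ih =>
    simp only [List.map_cons, List.foldl_cons]
    rw [← Nat.cast_max]
    exact ih (max a p.2.length)

theorem pvFoldl_max_nat (xs : List Nat) (a : Nat) : xs.foldl max a = max a (xs.foldr max 0) := by
  induction xs generalizing a with
  | nil => simp
  | cons x t ih =>
    simp only [List.foldl_cons, List.foldr_cons]
    rw [ih (max a x)]
    omega

theorem pvMax?_eq (fc : List (String × List String)) (hne : fc ≠ []) :
    PySem.List.max? (fc.map (fun p => (p.2.length : Int))) (fun x => x)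
      = some ((pvMaxLen (fc.map Prod.snd) : Nat) : Int) := by
  cases fc with
  | nil => exact absurd rfl hne
  | cons p ps =>
    simp only [List.map_cons]
    rw [PySem.List.max?_id_cons]
    congr 1
    rw [show (p.2.length : Int) = ((p.2.length : Nat) : Int) from rfl]
    rw [pvFoldl_max_cast]
    congr 1
    rw [pvFoldl_max_nat]
    simp only [pvMaxLen, List.map_cons, List.foldr_cons, List.map_map]
    rfl

-- A's cell expression is List.getD
theorem pvCell_eq (files : List String) (k : Nat) :
    (if (k : Int) < (files.length : Int) then PySem.List.pyGetD files (k : Int) "" else "")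
      = files.getD k "" := by
  by_cases hk : k < files.length
  · rw [if_pos (by exact_mod_cast hk)]
    simp [PySem.List.pyGetD_natCast]
  · rw [if_neg (by intro h2; exact hk (by exact_mod_cast h2))]
    rw [List.getD_eq_default]
    omega

-- ===== VERDICT (by name: the statement is the Claim_ definition above) =====
theorem create_table_data_spec : Claim_equal_create_table_data := by
  intro fc _ hpre
  obtain ⟨hne, hnd⟩ := hpre
  unfold Spec_create_table_data create_table_data create_table_data_alt
  rw [pvMax?_eq fc hne]
  simp only
  rw [pvTranspose_eq (pvMaxLen (fc.map Prod.snd)) (fc.map Prod.snd) rfl]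
  rw [List.singleton_append]
  congr 1
  rw [PySem.List.pyRange_zero_natCast, List.map_map]
  apply List.map_congr_left
  intro k _
  simp only [Function.comp_apply, List.map_map]
  apply List.map_congr_left
  intro p hp
  simp only [Function.comp_apply]
  rw [pvLookup_of_mem fc p.1 p.2 hnd (by simpa using hp)]
  simp only [Option.getD_some]
  exact pvCell_eq p.2 k
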